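-- pv_equiv track=rewrite | github.com/impresso/impresso-text-acquisition | text_importer/importers/tetml/tetml2canonical.py | compute_bb
-- ===== SOURCE A (Python) =====
-- def compute_bb(innerbbs):
--     """Return bounding box (x,y,w,h) from a list of inner bounding boxes
--
--
--
--     """
--
--     bblux = min(b[0] for b in innerbbs)
--     bbluy = min(b[1] for b in innerbbs)
--     bbrlx = max(b[0] + b[2] for b in innerbbs)
--     bbrly = max(b[1] + b[3] for b in innerbbs)
--     bbw = bbrlx - bblux
--     bbh = bbrly - bbluy
--     return [bblux, bbluy, bbw, bbh]
-- ===== SOURCE B (Python) =====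
-- def compute_bb(innerbbs):
--     """Return bounding box (x,y,w,h) from a list of inner bounding boxes"""
--     if not innerbbs:
--         raise ValueError("compute_bb() arg is an empty sequence")
--     x, y, w, h = innerbbs[0]
--     lux, luy, rlx, rly = x, y, x + w, y + h
--     for bx, by, bw, bh in innerbbs[1:]:
--         if bx < lux:
--             lux = bx
--         if by < luy:
--             luy = by
--         if bx + bw > rlx:
--             rlx = bx + bw
--         if by + bh > rly:
--             rly = by + bh
--     return [lux, luy, rlx - lux, rly - luy]
-- ===== Notes on version B (the rewrite author's own statement) =====
-- stated objective: alternative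
-- what changed: Replaces four separate generator passes (min/min/max/max) over the list with a single loop maintaining four accumulators initialized from the first box.
import Mathlib
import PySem

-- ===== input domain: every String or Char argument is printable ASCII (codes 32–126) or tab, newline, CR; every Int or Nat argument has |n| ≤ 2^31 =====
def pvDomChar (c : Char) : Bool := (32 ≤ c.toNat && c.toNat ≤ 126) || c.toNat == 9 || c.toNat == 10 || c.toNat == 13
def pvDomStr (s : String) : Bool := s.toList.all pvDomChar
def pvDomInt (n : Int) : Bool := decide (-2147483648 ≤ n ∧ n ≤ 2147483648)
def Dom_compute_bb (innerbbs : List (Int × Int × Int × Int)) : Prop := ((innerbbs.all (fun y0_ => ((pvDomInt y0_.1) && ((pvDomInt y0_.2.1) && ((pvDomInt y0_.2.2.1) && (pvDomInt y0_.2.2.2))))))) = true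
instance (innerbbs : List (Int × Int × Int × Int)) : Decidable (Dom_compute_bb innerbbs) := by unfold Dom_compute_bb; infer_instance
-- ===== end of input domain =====

-- B replaces A's four separate min/max passes with one loop carrying four accumulators (alternative decomposition).


-- ===== PORT A =====
-- min(gen)/max(gen) over a generator = PySem.List.min?/max? over the mapped list (none = ValueError, excluded by Pre_)
def compute_bb (innerbbs : List (Int × Int × Int × Int)) : List Int :=
  match PySem.List.min? (innerbbs.map (fun b => b.1)) (fun v => v),
        PySem.List.min? (innerbbs.map (fun b => b.2.1)) (fun v => v),
        PySem.List.max? (innerbbs.map (fun b => b.1 + b.2.2.1)) (fun v => v),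
        PySem.List.max? (innerbbs.map (fun b => b.2.1 + b.2.2.2)) (fun v => v) with
  | some bblux, some bbluy, some bbrlx, some bbrly =>
      [bblux, bbluy, bbrlx - bblux, bbrly - bbluy]
  | _, _, _, _ => []   -- unreachable under Pre_ (A raises ValueError on [])

-- ===== PORT B =====
def bbStep (acc : Int × Int × Int × Int) (b : Int × Int × Int × Int) : Int × Int × Int × Int :=
  (if b.1 < acc.1 then b.1 else acc.1,
   if b.2.1 < acc.2.1 then b.2.1 else acc.2.1,
   if b.1 + b.2.2.1 > acc.2.2.1 then b.1 + b.2.2.1 else acc.2.2.1,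
   if b.2.1 + b.2.2.2 > acc.2.2.2 then b.2.1 + b.2.2.2 else acc.2.2.2)

def compute_bb_alt (innerbbs : List (Int × Int × Int × Int)) : List Int :=
  match innerbbs with
  | [] => []   -- unreachable under Pre_ (B raises ValueError on [])
  | (x, y, w, h) :: rest =>
      let f := rest.foldl bbStep (x, y, x + w, y + h)
      [f.1, f.2.1, f.2.2.1 - f.1, f.2.2.2 - f.2.1]

-- ===== PRECONDITION & SPEC =====
-- Both A and B raise ValueError on the empty list (min()/explicit raise): excluded.
def Pre_compute_bb (innerbbs : List (Int × Int × Int × Int)) : Prop := innerbbs ≠ []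
instance (innerbbs : List (Int × Int × Int × Int)) : Decidable (Pre_compute_bb innerbbs) := by unfold Pre_compute_bb; infer_instance
def pvWitness_compute_bb : (List (Int × Int × Int × Int)) := [(1, 2, 3, 4), (0, 5, 2, 2)]

def Spec_compute_bb (innerbbs : List (Int × Int × Int × Int)) (out : List Int) : Prop := out = compute_bb_alt innerbbs
instance (innerbbs : List (Int × Int × Int × Int)) (out : List Int) : Decidable (Spec_compute_bb innerbbs out) := by unfold Spec_compute_bb; infer_instance

-- ===== CLAIM =====
def Claim_equal_compute_bb : Prop := ∀ (innerbbs : List (Int × Int × Int × Int)), Dom_compute_bb innerbbs → Pre_compute_bb innerbbs → Spec_compute_bb innerbbs (compute_bb innerbbs)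

-- ===== LEMMAS AND PROOFS =====
-- B's single fold computes the four running extrema A computes in four separate passes.
theorem bb_fold_split (rest : List (Int × Int × Int × Int)) :
    ∀ a b c d : Int,
      rest.foldl bbStep (a, b, c, d) =
        ((rest.map (fun p => p.1)).foldl min a,
         (rest.map (fun p => p.2.1)).foldl min b,
         (rest.map (fun p => p.1 + p.2.2.1)).foldl max c,
         (rest.map (fun p => p.2.1 + p.2.2.2)).foldl max d) := by
  induction rest with
  | nil => intro a b c d; rfl
  | cons p t ih =>
      intro a b c d
      have h1 : ∀ u v : Int, (if v < u then v else u) = min u v := by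
        intro u v; split_ifs <;> omega
      have h2 : ∀ u v : Int, (if v > u then v else u) = max u v := by
        intro u v; split_ifs <;> omega
      simp only [List.foldl_cons, List.map_cons, bbStep, h1, h2, ih]

-- ===== VERDICT =====
theorem compute_bb_spec : Claim_equal_compute_bb := by
  intro innerbbs _ hpre
  match innerbbs with
  | [] => exact absurd rfl hpre
  | (x, y, w, h) :: rest =>
      unfold Spec_compute_bb compute_bb compute_bb_alt
      simp only [List.map_cons, PySem.List.min?_id_cons, PySem.List.max?_id_cons,
        bb_fold_split]
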